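-- pv_equiv track=rewrite | github.com/OkamotoDaiki/InfsDownload | script/interpolation.py | SegmentNAN
-- ===== SOURCE A (Python) =====
-- def SegmentNAN(nan_numbers):
--     """
--     Separate continuous number from nan_numbers.
--     """
--     #init values
--     segment_num = {}
--     block = []
--     key_segment_num = 0
--     count = 0
--     nan_numbers_len = len(nan_numbers)
--     for nan_number in nan_numbers:
--         count += 1
--         if len(block) != 0 and block[-1] + 1 != nan_number:
--             segment_num[key_segment_num] = block
--             block = []
--             key_segment_num += 1
--
--         block.append(nan_number)
--
--         if count == nan_numbers_len:
--             #end array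
--             segment_num[key_segment_num] = block
--     return segment_num
-- ===== SOURCE B (Python) =====
-- def SegmentNAN(nan_numbers):
--     """
--     Separate continuous number from nan_numbers.
--     """
--     rev_groups = []  # runs of the reversed input: runs in reverse order, each run descending
--     for v in reversed(nan_numbers):
--         if rev_groups and rev_groups[-1][-1] == v + 1:
--             rev_groups[-1].append(v)
--         else:
--             rev_groups.append([v])
--     return {i: g[::-1] for i, g in enumerate(reversed(rev_groups))}
-- ===== Notes on version B (the rewrite author's own statement) =====
-- stated objective: alternative
-- what changed: Replaces A's forward accumulator state machine (block/flush/count bookkeeping with a last-element sentinel check) by a right-to-left pass that builds the runs back-to-front (extend the most recent run or open a new one), then reverses and numbers the runs with enumerate.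
import Mathlib
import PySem

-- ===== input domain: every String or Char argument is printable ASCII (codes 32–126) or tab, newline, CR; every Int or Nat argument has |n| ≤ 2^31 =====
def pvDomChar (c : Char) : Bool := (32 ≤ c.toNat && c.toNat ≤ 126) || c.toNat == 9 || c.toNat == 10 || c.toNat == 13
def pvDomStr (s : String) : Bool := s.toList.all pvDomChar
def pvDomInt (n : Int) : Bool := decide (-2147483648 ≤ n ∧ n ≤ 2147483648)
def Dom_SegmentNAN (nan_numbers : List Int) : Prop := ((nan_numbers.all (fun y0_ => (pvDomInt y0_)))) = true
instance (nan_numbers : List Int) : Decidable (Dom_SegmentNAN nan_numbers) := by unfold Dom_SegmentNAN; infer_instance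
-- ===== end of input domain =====

-- B replaces A's forward block/flush/count state machine by a right-to-left pass that
-- builds the list of runs back-to-front, then numbers the runs (objective: alternative).

-- ===== PORT A =====
-- loop body of A's for-loop, as a named fold step (n = len(nan_numbers))
def pvStepA (n : Int) (st : PySem.Dict Int (List Int) × List Int × Int × Int) (x : Int) :
    PySem.Dict Int (List Int) × List Int × Int × Int :=
  let segs := st.1
  let block := st.2.1
  let key := st.2.2.1
  let count := st.2.2.2 + 1
  let p :=
    if block.length ≠ 0 ∧ (PySem.List.pyGet? block (-1)).getD 0 + 1 ≠ x then
      (segs.insert key block, ([] : List Int), key + 1)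
    else (segs, block, key)
  let block := p.2.1 ++ [x]
  let segs := if count = n then p.1.insert p.2.2 block else p.1
  (segs, block, p.2.2, count)

def SegmentNAN (nan_numbers : List Int) : List (Int × List Int) :=
  ((nan_numbers.foldl (pvStepA (nan_numbers.length))
      (PySem.Dict.empty, ([] : List Int), (0 : Int), (0 : Int))).1).items

-- ===== PORT B =====
-- loop body of B's reversed-order for-loop (rev_groups[-1].append(v) becomes dropLast ++ [last ++ [v]])
def pvStepB (gs : List (List Int)) (v : Int) : List (List Int) :=
  if gs ≠ [] ∧ (gs.getLastD []).getLastD 0 = v + 1 then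
    gs.dropLast ++ [gs.getLastD [] ++ [v]]
  else gs ++ [[v]]

def SegmentNAN_alt (nan_numbers : List Int) : List (Int × List Int) :=
  let rev_groups := nan_numbers.reverse.foldl pvStepB []
  PySem.List.enumerate
    (rev_groups.reverse.map (fun g => (PySem.List.slice? g none none (-1)).getD []))

-- ===== PRECONDITION & SPEC =====
def Spec_SegmentNAN (nan_numbers : List Int) (out : List (Int × List Int)) : Prop := out = SegmentNAN_alt nan_numbers
instance (nan_numbers : List Int) (out : List (Int × List Int)) : Decidable (Spec_SegmentNAN nan_numbers out) := by unfold Spec_SegmentNAN; infer_instance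

-- ===== CLAIM (what is proved, stated in full; the proofs are below) =====
def Claim_equal_SegmentNAN : Prop := ∀ (nan_numbers : List Int), Dom_SegmentNAN nan_numbers → Spec_SegmentNAN nan_numbers (SegmentNAN nan_numbers)

-- ===== LEMMAS AND PROOFS =====

-- canonical decomposition of a list into maximal consecutive runs
def pvSplit1 (v : Int) : List Int → List Int × List Int
  | [] => ([], [])
  | x :: r => if x = v + 1 then ((x :: (pvSplit1 x r).1), (pvSplit1 x r).2) else ([], x :: r)

theorem pvSplit1_snd_le (v : Int) (l : List Int) : (pvSplit1 v l).2.length ≤ l.length := by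
  induction l generalizing v with
  | nil => simp [pvSplit1]
  | cons x r ih =>
    simp only [pvSplit1]
    split
    · exact le_trans (ih x) (Nat.le_succ _)
    · simp

def pvRuns : List Int → List (List Int)
  | [] => []
  | x :: r => (x :: (pvSplit1 x r).1) :: pvRuns (pvSplit1 x r).2
termination_by l => l.length
decreasing_by exact Nat.lt_succ_of_le (pvSplit1_snd_le _ _)

theorem pvRuns_nil : pvRuns [] = [] := by rw [pvRuns.eq_def]

theorem pvRuns_cons (x : Int) (r : List Int) :
    pvRuns (x :: r) = (x :: (pvSplit1 x r).1) :: pvRuns (pvSplit1 x r).2 := by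
  rw [pvRuns.eq_def]

-- B's loop state after consuming the reversed tail: runs in reverse order, each run reversed
def pvRevRuns (xs : List Int) : List (List Int) := ((pvRuns xs).map List.reverse).reverse

theorem pvStepB_runs (x : Int) (r : List Int) : pvStepB (pvRevRuns r) x = pvRevRuns (x :: r) := by
  cases r with
  | nil => simp [pvRevRuns, pvRuns_nil, pvRuns_cons, pvSplit1, pvStepB]
  | cons y t =>
    by_cases hy : y = x + 1
    · subst hy
      rw [pvRevRuns, pvRevRuns, pvRuns_cons x, pvRuns_cons (x + 1) t]
      simp [pvStepB, pvSplit1]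
    · rw [pvRevRuns, pvRevRuns, pvRuns_cons x]
      simp [pvStepB, pvSplit1, hy, pvRuns_cons y t]

theorem pvFoldl_rev_runs (xs : List Int) : xs.reverse.foldl pvStepB [] = pvRevRuns xs := by
  induction xs with
  | nil => simp [pvRevRuns, pvRuns_nil]
  | cons x r ih =>
    rw [List.reverse_cons, List.foldl_append, ih]
    simp only [List.foldl_cons, List.foldl_nil]
    exact pvStepB_runs x r

-- A's evolving block, seen as the runs of (block ++ remaining input)
def pvRunsCont (bl : List Int) : List Int → List (List Int)
  | [] => [bl]
  | x :: r => if bl.getLast?.getD 0 + 1 = x then pvRunsCont (bl ++ [x]) r else bl :: pvRunsCont [x] r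

theorem pvRunsCont_eq (rem : List Int) : ∀ bl : List Int, bl ≠ [] →
    pvRunsCont bl rem =
      (bl ++ (pvSplit1 (bl.getLast?.getD 0) rem).1) ::
        pvRuns ((pvSplit1 (bl.getLast?.getD 0) rem).2) := by
  induction rem with
  | nil => intro bl _; simp [pvRunsCont, pvSplit1, pvRuns_nil]
  | cons x r ih =>
    intro bl hbl
    by_cases h : bl.getLast?.getD 0 + 1 = x
    · have hx : x = bl.getLast?.getD 0 + 1 := h.symm
      rw [pvRunsCont, if_pos h, ih (bl ++ [x]) (by simp)]
      simp [pvSplit1, hx]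
    · have hx : ¬ x = bl.getLast?.getD 0 + 1 := fun hc => h hc.symm
      rw [pvRunsCont, if_neg h, ih [x] (by simp)]
      simp [pvSplit1, hx, pvRuns_cons x r]

theorem pv_not_contains_of_keys_lt (segs : PySem.Dict Int (List Int)) (key : Int)
    (hkeys : ∀ k ∈ segs.keys, k < key) : segs.contains key = false := by
  by_contra hc
  have hmem : key ∈ segs.keys := (PySem.Dict.contains_iff_mem_keys segs key).1 (by
    cases h' : segs.contains key
    · exact absurd h' hc
    · rfl)
  exact absurd (hkeys key hmem) (lt_irrefl key)

-- the main loop invariant for A's fold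
theorem pvFoldA_main (n : Int) (rem : List Int) :
    ∀ (segs : PySem.Dict Int (List Int)) (bl : List Int) (key c : Int),
      bl ≠ [] → rem ≠ [] → c + (rem.length : Int) = n →
      (∀ k ∈ segs.keys, k < key) →
      ((rem.foldl (pvStepA n) (segs, bl, key, c)).1).items =
        segs.items ++ PySem.List.enumerate (pvRunsCont bl rem) key := by
  induction rem with
  | nil => intro _ _ _ _ _ hne _ _; exact absurd rfl hne
  | cons x r ih =>
    intro segs bl key c hbl _ hlen hkeys
    have hnc : segs.contains key = false := pv_not_contains_of_keys_lt segs key hkeys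
    have hbl0 : bl.length ≠ 0 := by simpa using hbl
    by_cases hcont : bl.getLast?.getD 0 + 1 = x
    · -- run continues: no flush
      have hstep : pvStepA n (segs, bl, key, c) x =
          (if c + 1 = n then segs.insert key (bl ++ [x]) else segs, bl ++ [x], key, c + 1) := by
        simp [pvStepA, PySem.List.pyGet?_neg_one, hcont]
      rw [List.foldl_cons, hstep, pvRunsCont, if_pos hcont]
      cases r with
      | nil =>
        have hc1 : c + 1 = n := by simpa using hlen
        rw [if_pos hc1]
        simp only [List.foldl_nil]
        rw [PySem.Dict.items_insert_of_not_contains segs (bl ++ [x]) hnc]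
        simp [pvRunsCont, PySem.List.enumerate_cons, PySem.List.enumerate_nil]
      | cons y t =>
        have hc1 : ¬ (c + 1 = n) := by
          simp only [List.length_cons] at hlen; push_cast at hlen ⊢; omega
        rw [if_neg hc1]
        exact ih segs (bl ++ [x]) key (c + 1) (by simp) (by simp)
          (by simp only [List.length_cons] at hlen ⊢; push_cast at hlen ⊢; omega) hkeys
    · -- run breaks: flush block, start a new one
      have hstep : pvStepA n (segs, bl, key, c) x =
          (if c + 1 = n then (segs.insert key bl).insert (key + 1) [x] else segs.insert key bl,
            [x], key + 1, c + 1) := by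
        simp [pvStepA, PySem.List.pyGet?_neg_one, hcont, hbl0]
      have hkeys' : ∀ k ∈ (segs.insert key bl).keys, k < key + 1 := by
        intro k hk
        rcases (PySem.Dict.mem_keys_insert segs key k bl).1 hk with h | h
        · omega
        · exact lt_trans (hkeys k h) (by omega)
      have hnc' : (segs.insert key bl).contains (key + 1) = false :=
        pv_not_contains_of_keys_lt _ _ hkeys'
      rw [List.foldl_cons, hstep, pvRunsCont, if_neg hcont]
      cases r with
      | nil =>
        have hc1 : c + 1 = n := by simpa using hlen
        rw [if_pos hc1]
        simp only [List.foldl_nil]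
        rw [PySem.Dict.items_insert_of_not_contains _ ([x] : List Int) hnc',
          PySem.Dict.items_insert_of_not_contains segs bl hnc]
        simp [pvRunsCont, PySem.List.enumerate_cons, PySem.List.enumerate_nil]
      | cons y t =>
        have hc1 : ¬ (c + 1 = n) := by
          simp only [List.length_cons] at hlen; push_cast at hlen ⊢; omega
        rw [if_neg hc1]
        rw [ih (segs.insert key bl) [x] (key + 1) (c + 1) (by simp) (by simp)
          (by simp only [List.length_cons] at hlen ⊢; push_cast at hlen ⊢; omega) hkeys']
        rw [PySem.Dict.items_insert_of_not_contains segs bl hnc]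
        simp [PySem.List.enumerate_cons]

theorem pvA_eq_runs (xs : List Int) : SegmentNAN xs = PySem.List.enumerate (pvRuns xs) := by
  cases xs with
  | nil =>
    rw [SegmentNAN]
    simp only [List.foldl_nil, pvRuns_nil, PySem.List.enumerate_nil]
    rfl
  | cons x rest =>
    have hstep : pvStepA ((x :: rest).length) (PySem.Dict.empty, ([] : List Int), 0, 0) x =
        (if (1 : Int) = ((x :: rest).length : Int) then PySem.Dict.empty.insert 0 [x]
          else PySem.Dict.empty, [x], 0, 1) := by
      simp [pvStepA]
    cases rest with
    | nil =>
      rw [SegmentNAN]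
      simp only [List.foldl_cons, List.foldl_nil, hstep]
      norm_num
      rw [PySem.Dict.items_insert_of_not_contains PySem.Dict.empty ([x] : List Int)
        (by simp [PySem.Dict.contains_empty])]
      simp [pvRuns_cons, pvRuns_nil, pvSplit1, PySem.List.enumerate_cons,
        PySem.List.enumerate_nil]
      rfl
    | cons y t =>
      rw [SegmentNAN, List.foldl_cons, hstep]
      have h1 : ¬ ((1 : Int) = ((x :: y :: t).length : Int)) := by
        simp only [List.length_cons]; push_cast; omega
      rw [if_neg h1]
      rw [pvFoldA_main ((x :: y :: t).length) (y :: t) PySem.Dict.empty [x] 0 1 (by simp)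
        (by simp) (by simp only [List.length_cons]; push_cast; omega)
        (by simp [PySem.Dict.keys_empty])]
      rw [pvRunsCont_eq (y :: t) [x] (by simp)]
      have hempty : (PySem.Dict.empty : PySem.Dict Int (List Int)).items = [] := rfl
      rw [hempty, List.nil_append, pvRuns_cons]
      simp

theorem pvB_eq_runs (xs : List Int) : SegmentNAN_alt xs = PySem.List.enumerate (pvRuns xs) := by
  rw [SegmentNAN_alt]
  simp only [pvFoldl_rev_runs, pvRevRuns, List.reverse_reverse, List.map_map,
    PySem.List.slice?_none_none_neg_one]
  congr 1
  simp

-- ===== VERDICT (by name: the statement is the Claim_ definition above) =====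
theorem SegmentNAN_spec : Claim_equal_SegmentNAN := by
  intro xs _
  show SegmentNAN xs = SegmentNAN_alt xs
  rw [pvA_eq_runs, pvB_eq_runs]
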